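-- pv_equiv track=rewrite | github.com/Jayant1711/Tax_Assist-system | backend/nlp_engine.py | _get_asked_cat
-- ===== SOURCE A (Python) =====
-- from typing import Dict, Any, List, Optional
--
-- def _get_asked_cat(last_q: str, profile: Optional[str] = None) -> Optional[str]:
--     if not last_q: return None
--     lq = last_q.lower()
--     if any(k in lq for k in ["salary", "income", "earn"]):
--         return "business" if profile == "Business Owner" else "salary"
--     if any(k in lq for k in ["80c", "ppf", "lic", "elss", "investment", "saving"]): return "80c"
--     if any(k in lq for k in ["health", "insurance", "80d", "medical"]): return "80d"
--     if any(k in lq for k in ["nps", "pension", "80ccd"]): return "nps"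
--     if any(k in lq for k in ["home loan", "24b", "interest"]): return "24b"
--     if any(k in lq for k in ["rent", "hra", "80gg"]): return "hra"
--     if any(k in lq for k in ["donation", "charity", "ngo", "gift"]): return "80g"
--     return None
-- ===== SOURCE B (Python) =====
-- from typing import Optional
--
-- # Flat inverted index: keyword -> category (instead of per-category keyword groups).
-- _KEYWORD_CAT = {
--     "salary": "salary", "income": "salary", "earn": "salary",
--     "80c": "80c", "ppf": "80c", "lic": "80c", "elss": "80c",
--     "investment": "80c", "saving": "80c",
--     "health": "80d", "insurance": "80d", "80d": "80d", "medical": "80d",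
--     "nps": "nps", "pension": "nps", "80ccd": "nps",
--     "home loan": "24b", "24b": "24b", "interest": "24b",
--     "rent": "hra", "hra": "hra", "80gg": "hra",
--     "donation": "80g", "charity": "80g", "ngo": "80g", "gift": "80g",
-- }
-- _PRIORITY = ["salary", "80c", "80d", "nps", "24b", "hra", "80g"]
--
-- def _get_asked_cat(last_q: str, profile: Optional[str] = None) -> Optional[str]:
--     if not last_q:
--         return None
--     lq = last_q.lower()
--     # Stage 1: one flat scan over all keywords, collecting every matched category.
--     matched = {cat for kw, cat in _KEYWORD_CAT.items() if kw in lq}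
--     # Stage 2: pick the highest-priority matched category; adjust salary by profile.
--     for cat in _PRIORITY:
--         if cat in matched:
--             return "business" if cat == "salary" and profile == "Business Owner" else cat
--     return None
-- ===== Notes on version B (the rewrite author's own statement) =====
-- stated objective: alternative
-- what changed: A's short-circuiting per-category if-cascade of grouped any() tests is replaced by a two-stage pass: a flat keyword->category dict scanned once to build the set of all matched categories, then a selection of the highest-priority matched category (with the profile adjustment applied at selection time).
import Mathlib
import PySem

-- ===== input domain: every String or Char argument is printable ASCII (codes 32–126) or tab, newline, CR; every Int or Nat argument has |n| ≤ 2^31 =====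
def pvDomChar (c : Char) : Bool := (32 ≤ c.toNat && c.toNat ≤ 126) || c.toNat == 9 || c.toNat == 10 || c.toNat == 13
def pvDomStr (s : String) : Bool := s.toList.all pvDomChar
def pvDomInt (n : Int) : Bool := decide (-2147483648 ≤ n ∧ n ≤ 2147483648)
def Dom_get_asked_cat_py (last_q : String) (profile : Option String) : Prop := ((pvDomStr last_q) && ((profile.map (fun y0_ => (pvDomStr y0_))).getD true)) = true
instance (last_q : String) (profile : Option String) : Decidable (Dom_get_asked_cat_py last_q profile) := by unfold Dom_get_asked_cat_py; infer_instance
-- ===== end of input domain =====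

-- B replaces A's per-category if-cascade by two stages: one flat keyword->category index scanned once to collect the set of matched categories, then a priority-order selection; idiomatic/alternative, same cost.


-- ===== PORT A =====
def get_asked_cat_py (last_q : String) (profile : Option String) : Option String :=
  if last_q == "" then none else
  let lq := PySem.Str.lower last_q
  if (["salary", "income", "earn"].any fun k => PySem.Str.isIn k lq) then
    (if profile == some "Business Owner" then some "business" else some "salary")
  else if (["80c", "ppf", "lic", "elss", "investment", "saving"].any fun k => PySem.Str.isIn k lq) then some "80c"
  else if (["health", "insurance", "80d", "medical"].any fun k => PySem.Str.isIn k lq) then some "80d"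
  else if (["nps", "pension", "80ccd"].any fun k => PySem.Str.isIn k lq) then some "nps"
  else if (["home loan", "24b", "interest"].any fun k => PySem.Str.isIn k lq) then some "24b"
  else if (["rent", "hra", "80gg"].any fun k => PySem.Str.isIn k lq) then some "hra"
  else if (["donation", "charity", "ngo", "gift"].any fun k => PySem.Str.isIn k lq) then some "80g"
  else none

-- ===== PORT B =====
-- flat keyword -> category index (the dict _KEYWORD_CAT in Source B, iterated over its items)
def pvKwCat : List (String × String) :=
  [ ("salary", "salary"), ("income", "salary"), ("earn", "salary"),
    ("80c", "80c"), ("ppf", "80c"), ("lic", "80c"), ("elss", "80c"),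
    ("investment", "80c"), ("saving", "80c"),
    ("health", "80d"), ("insurance", "80d"), ("80d", "80d"), ("medical", "80d"),
    ("nps", "nps"), ("pension", "nps"), ("80ccd", "nps"),
    ("home loan", "24b"), ("24b", "24b"), ("interest", "24b"),
    ("rent", "hra"), ("hra", "hra"), ("80gg", "hra"),
    ("donation", "80g"), ("charity", "80g"), ("ngo", "80g"), ("gift", "80g") ]

def pvPriority : List String := ["salary", "80c", "80d", "nps", "24b", "hra", "80g"]

-- stage 1: the set comprehension {cat for kw, cat in _KEYWORD_CAT.items() if kw in lq}
def pvMatched (lq : String) : PySem.Set String :=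
  PySem.Set.ofList ((pvKwCat.filter (fun p => PySem.Str.isIn p.1 lq)).map Prod.snd)

-- stage 2: first category of the priority list contained in the matched set
def pvPick (matched : PySem.Set String) : List String → Option String
  | [] => none
  | c :: rest => if PySem.Set.contains matched c then some c else pvPick matched rest

def get_asked_cat_py_alt (last_q : String) (profile : Option String) : Option String :=
  if last_q == "" then none else
  let lq := PySem.Str.lower last_q
  match pvPick (pvMatched lq) pvPriority with
  | none => none
  | some cat =>
      if cat == "salary" && profile == some "Business Owner" then some "business" else some cat

-- ===== PRECONDITION & SPEC =====
def Spec_get_asked_cat_py (last_q : String) (profile : Option String) (out : Option String) : Prop := out = get_asked_cat_py_alt last_q profile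
instance (last_q : String) (profile : Option String) (out : Option String) : Decidable (Spec_get_asked_cat_py last_q profile out) := by unfold Spec_get_asked_cat_py; infer_instance

-- ===== CLAIM (what is proved, stated in full; the proofs are below) =====
def Claim_equal_get_asked_cat_py : Prop := ∀ (last_q : String) (profile : Option String), Dom_get_asked_cat_py last_q profile → Spec_get_asked_cat_py last_q profile (get_asked_cat_py last_q profile)

-- ===== LEMMAS AND PROOFS =====
-- For each category c: membership of c in the matched set equals A's per-group any() test.
theorem c_salary (lq : String) :
    PySem.Set.contains (pvMatched lq) "salary" = (["salary", "income", "earn"].any fun k => PySem.Str.isIn k lq) := by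
  rw [Bool.eq_iff_iff, PySem.Set.contains_iff]
  unfold pvMatched
  simp [PySem.Set.mem_ofList, List.mem_filter, List.mem_map, pvKwCat]

theorem c_80c (lq : String) :
    PySem.Set.contains (pvMatched lq) "80c" = (["80c", "ppf", "lic", "elss", "investment", "saving"].any fun k => PySem.Str.isIn k lq) := by
  rw [Bool.eq_iff_iff, PySem.Set.contains_iff]
  unfold pvMatched
  simp [PySem.Set.mem_ofList, List.mem_filter, List.mem_map, pvKwCat]

theorem c_80d (lq : String) :
    PySem.Set.contains (pvMatched lq) "80d" = (["health", "insurance", "80d", "medical"].any fun k => PySem.Str.isIn k lq) := by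
  rw [Bool.eq_iff_iff, PySem.Set.contains_iff]
  unfold pvMatched
  simp [PySem.Set.mem_ofList, List.mem_filter, List.mem_map, pvKwCat]

theorem c_nps (lq : String) :
    PySem.Set.contains (pvMatched lq) "nps" = (["nps", "pension", "80ccd"].any fun k => PySem.Str.isIn k lq) := by
  rw [Bool.eq_iff_iff, PySem.Set.contains_iff]
  unfold pvMatched
  simp [PySem.Set.mem_ofList, List.mem_filter, List.mem_map, pvKwCat]

theorem c_24b (lq : String) :
    PySem.Set.contains (pvMatched lq) "24b" = (["home loan", "24b", "interest"].any fun k => PySem.Str.isIn k lq) := by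
  rw [Bool.eq_iff_iff, PySem.Set.contains_iff]
  unfold pvMatched
  simp [PySem.Set.mem_ofList, List.mem_filter, List.mem_map, pvKwCat]

theorem c_hra (lq : String) :
    PySem.Set.contains (pvMatched lq) "hra" = (["rent", "hra", "80gg"].any fun k => PySem.Str.isIn k lq) := by
  rw [Bool.eq_iff_iff, PySem.Set.contains_iff]
  unfold pvMatched
  simp [PySem.Set.mem_ofList, List.mem_filter, List.mem_map, pvKwCat]

theorem c_80g (lq : String) :
    PySem.Set.contains (pvMatched lq) "80g" = (["donation", "charity", "ngo", "gift"].any fun k => PySem.Str.isIn k lq) := by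
  rw [Bool.eq_iff_iff, PySem.Set.contains_iff]
  unfold pvMatched
  simp [PySem.Set.mem_ofList, List.mem_filter, List.mem_map, pvKwCat]

theorem pv_main (lq : String) (profile : Option String) :
    (if (["salary", "income", "earn"].any fun k => PySem.Str.isIn k lq) then
      (if profile == some "Business Owner" then some "business" else some "salary")
    else if (["80c", "ppf", "lic", "elss", "investment", "saving"].any fun k => PySem.Str.isIn k lq) then some "80c"
    else if (["health", "insurance", "80d", "medical"].any fun k => PySem.Str.isIn k lq) then some "80d"
    else if (["nps", "pension", "80ccd"].any fun k => PySem.Str.isIn k lq) then some "nps"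
    else if (["home loan", "24b", "interest"].any fun k => PySem.Str.isIn k lq) then some "24b"
    else if (["rent", "hra", "80gg"].any fun k => PySem.Str.isIn k lq) then some "hra"
    else if (["donation", "charity", "ngo", "gift"].any fun k => PySem.Str.isIn k lq) then some "80g"
    else none) =
    (match pvPick (pvMatched lq) pvPriority with
     | none => none
     | some cat =>
        if cat == "salary" && profile == some "Business Owner" then some "business" else some cat) := by
  simp only [pvPriority, pvPick, c_salary, c_80c, c_80d, c_nps, c_24b, c_hra, c_80g]
  split_ifs <;> simp_all

-- ===== VERDICT (by name: the statement is the Claim_ definition above) =====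
theorem get_asked_cat_py_spec : Claim_equal_get_asked_cat_py := by
  intro last_q profile _
  unfold Spec_get_asked_cat_py get_asked_cat_py get_asked_cat_py_alt
  by_cases h : last_q == ""
  · simp [h]
  · simp only [h, Bool.false_eq_true, if_false]
    exact pv_main (PySem.Str.lower last_q) profile
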